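-- pv_equiv track=rewrite | github.com/mihirvk2/CSNR-optimal-ADC | imc_adc_column.py | pots
-- ===== SOURCE A (Python) =====
-- def pots(x):
--     # Power of two summation
--     x_len = len(x)
--     x_pots = 0
--     for i in range(x_len):
--         if(i==0):
--             x_pots -= x[i]*2**(x_len-1)
--         else:
--             x_pots += x[i]*2**(x_len-i-1)
--     return x_pots
-- ===== SOURCE B (Python) =====
-- def pots(x):
--     # Horner evaluation of the two's-complement value
--     if not x:
--         return 0
--     acc = -x[0]
--     for b in x[1:]:
--         acc = acc * 2 + b
--     return acc
-- ===== Notes on version B (the rewrite author's own statement) =====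
-- stated objective: faster
-- what changed: Replaces the indexed loop with explicit powers 2**(n-i-1) by a Horner-style fold: seed the accumulator with the negated sign bit and update acc = acc*2 + b over the remaining bits, eliminating indexing and big-integer exponentiation.
import Mathlib
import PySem

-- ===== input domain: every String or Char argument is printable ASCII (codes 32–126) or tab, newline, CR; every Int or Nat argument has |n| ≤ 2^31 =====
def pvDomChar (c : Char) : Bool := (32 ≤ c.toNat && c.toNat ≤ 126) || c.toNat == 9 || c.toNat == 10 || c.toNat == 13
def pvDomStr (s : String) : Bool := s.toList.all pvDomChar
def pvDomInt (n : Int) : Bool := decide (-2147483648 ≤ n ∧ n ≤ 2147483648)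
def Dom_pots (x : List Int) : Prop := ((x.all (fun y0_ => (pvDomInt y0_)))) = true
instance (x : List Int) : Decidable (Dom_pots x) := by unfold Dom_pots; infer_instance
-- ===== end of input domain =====

-- B: Horner evaluation of the two's-complement value instead of a weighted sum of explicit powers (simpler; equal on all inputs).

-- ===== PORT A =====
def pots (x : List Int) : Int :=
  (PySem.List.pyRange 0 (x.length : Int) 1).foldl
    (fun acc i =>
      if i = 0 then acc - PySem.List.pyGetD x i 0 * 2 ^ ((x.length : Int) - 1).toNat
      else acc + PySem.List.pyGetD x i 0 * 2 ^ ((x.length : Int) - i - 1).toNat) 0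

-- ===== PORT B =====
def pots_alt (x : List Int) : Int :=
  match x with
  | [] => 0
  | b :: rest => rest.foldl (fun acc bi => acc * 2 + bi) (-b)

-- ===== PRECONDITION & SPEC =====
def Spec_pots (x : List Int) (out : Int) : Prop := out = pots_alt x
instance (x : List Int) (out : Int) : Decidable (Spec_pots x out) := by unfold Spec_pots; infer_instance

-- ===== CLAIM (what is proved, stated in full; the proofs are below) =====
def Claim_equal_pots : Prop := ∀ (x : List Int), Dom_pots x → Spec_pots x (pots x)

-- ===== LEMMAS AND PROOFS =====

-- Horner fold with an arbitrary accumulator.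
theorem horner_acc (l : List Int) : ∀ (a : Int),
    l.foldl (fun acc bi => acc * 2 + bi) a
      = a * 2 ^ l.length + l.foldl (fun acc bi => acc * 2 + bi) 0 := by
  induction l with
  | nil => intro a; simp
  | cons c l ih =>
      intro a
      simp only [List.foldl_cons, List.length_cons]
      rw [ih (a * 2 + c), ih (0 * 2 + c)]
      ring

-- The tail of A's loop (indices k..len-1, with 1 ≤ k) computes the Horner value of x.drop k.
theorem potsA_tail (x : List Int) : ∀ (m k : Nat) (acc : Int),
    k + m = x.length → 1 ≤ k →
    (PySem.List.pyRange (k : Int) (x.length : Int) 1).foldl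
      (fun acc i =>
        if i = 0 then acc - PySem.List.pyGetD x i 0 * 2 ^ ((x.length : Int) - 1).toNat
        else acc + PySem.List.pyGetD x i 0 * 2 ^ ((x.length : Int) - i - 1).toNat) acc
      = acc + (x.drop k).foldl (fun a b => a * 2 + b) 0 := by
  intro m
  induction m with
  | zero =>
      intro k acc hk _
      rw [PySem.List.pyRange_one_eq_nil (by omega)]
      simp [List.drop_eq_nil_of_le (by omega : x.length ≤ k)]
  | succ m ih =>
      intro k acc hk hk1
      have hklt : k < x.length := by omega
      rw [PySem.List.pyRange_one_cons (by exact_mod_cast hklt)]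
      simp only [List.foldl_cons]
      rw [if_neg (by omega)]
      have hget : PySem.List.pyGetD x (k : Int) 0 = x[k] := by
        rw [PySem.List.pyGetD_natCast]
        exact List.getD_eq_getElem x 0 hklt
      have hcast : ((k : Int) + 1) = ((k + 1 : Nat) : Int) := by push_cast; ring
      rw [hget, hcast, ih (k + 1) _ (by omega) (by omega)]
      have hdrop : x.drop k = x[k] :: x.drop (k + 1) :=
        (List.getElem_cons_drop hklt).symm
      rw [hdrop]
      simp only [List.foldl_cons]
      rw [horner_acc (x.drop (k+1)) (0 * 2 + x[k])]
      have hlen : (x.drop (k+1)).length = x.length - (k+1) := by simp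
      have hexp : ((x.length : Int) - (k : Int) - 1).toNat = x.length - (k + 1) := by omega
      rw [hlen, hexp]
      ring

-- ===== VERDICT (by name: the statement is the Claim_ definition above) =====
theorem pots_spec : Claim_equal_pots := by
  intro x _
  unfold Spec_pots pots pots_alt
  match x with
  | [] => simp [PySem.List.pyRange_one_eq_nil]
  | b :: rest =>
      rw [PySem.List.pyRange_one_cons (by simp)]
      simp only [List.foldl_cons, if_true]
      rw [PySem.List.pyGetD_zero_cons]
      have h1 : (0 : Int) + 1 = ((1 : Nat) : Int) := by norm_num
      rw [h1, potsA_tail (b :: rest) rest.length 1 _ (by simp [Nat.add_comm]) (by omega)]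
      have hexp : (((b :: rest).length : Int) - 1).toNat = rest.length := by
        simp
      rw [hexp]
      simp only [List.drop_succ_cons, List.drop_zero]
      rw [horner_acc rest (-b)]
      ring
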